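-- pv_equiv track=rewrite | github.com/openstack/cinder | cinder/volume/drivers/dothill/dothill_client.py | _safe_hostname
-- ===== SOURCE A (Python) =====
-- def _safe_hostname(hostname):
--     """Modify an initiator name to match firmware requirements.
--
--        Initiator name cannot include certain characters and cannot exceed
--        15 bytes in 'T' firmware (32 bytes in 'G' firmware).
--     """
--     for ch in [',', '"', '\\', '<', '>']:
--         if ch in hostname:
--             hostname = hostname.replace(ch, '')
--     index = len(hostname)
--     if index > 15:
--         index = 15
--     return hostname[:index]
-- ===== SOURCE B (Python) =====
-- def _safe_hostname(hostname):
--     bad = {',', '"', '\\', '<', '>'}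
--     return ''.join(c for c in hostname if c not in bad)[:15]
-- ===== Notes on version B (the rewrite author's own statement) =====
-- stated objective: idiomatic
-- what changed: One character-level pass filtering the forbidden characters against a set, then a single [:15] slice, instead of five full str.replace scans plus an explicit length clamp.
import Mathlib
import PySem

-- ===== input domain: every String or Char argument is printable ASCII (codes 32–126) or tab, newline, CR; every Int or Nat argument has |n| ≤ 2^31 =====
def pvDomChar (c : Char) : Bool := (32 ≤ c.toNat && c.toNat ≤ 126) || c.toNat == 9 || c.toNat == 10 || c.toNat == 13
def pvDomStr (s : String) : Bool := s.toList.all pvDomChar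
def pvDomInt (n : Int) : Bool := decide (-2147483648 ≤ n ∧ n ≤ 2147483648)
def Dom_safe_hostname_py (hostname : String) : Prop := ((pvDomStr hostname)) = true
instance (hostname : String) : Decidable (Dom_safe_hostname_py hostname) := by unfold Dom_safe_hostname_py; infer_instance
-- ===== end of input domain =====

-- B filters the forbidden characters in one pass over the string and slices to 15,
-- instead of A's five str.replace scans plus an explicit length clamp (idiomatic rewrite).

-- ===== PORT A =====
def safe_hostname_py (hostname : String) : String :=
  let h := [",", "\"", "\\", "<", ">"].foldl
    (fun h ch => if PySem.Str.isIn ch h then PySem.Str.replace h ch "" else h) hostname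
  let index : Int := PySem.Str.len h
  let index : Int := if index > 15 then 15 else index
  PySem.Str.slice h none (some index)

-- ===== PORT B =====
def safe_hostname_py_alt (hostname : String) : String :=
  String.ofList ((hostname.toList.filter
    (fun c => !([',', '"', '\\', '<', '>'].contains c))).take 15)

-- ===== PRECONDITION & SPEC =====
def Spec_safe_hostname_py (hostname : String) (out : String) : Prop := out = safe_hostname_py_alt hostname
instance (hostname : String) (out : String) : Decidable (Spec_safe_hostname_py hostname out) := by unfold Spec_safe_hostname_py; infer_instance

-- ===== CLAIM (what is proved, stated in full; the proofs are below) =====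
def Claim_equal_safe_hostname_py : Prop := ∀ (hostname : String), Dom_safe_hostname_py hostname → Spec_safe_hostname_py hostname (safe_hostname_py hostname)

-- ===== LEMMAS AND PROOFS =====

-- replace.go with a single-char pattern and empty replacement is a filter
theorem replace_go_single (c : Char) : ∀ (fuel : Nat) (l acc : List Char), l.length ≤ fuel →
    PySem.Chars.replace.go [c] [] fuel l acc = acc.reverse ++ l.filter (fun x => !(x == c)) := by
  intro fuel
  induction fuel with
  | zero => intro l acc h; cases l with
    | nil => simp [PySem.Chars.replace.go]
    | cons a t => simp at h
  | succ n ih =>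
    intro l acc h
    cases l with
    | nil => simp [PySem.Chars.replace.go]
    | cons a t =>
      rw [PySem.Chars.replace.go]
      by_cases hac : a = c
      · subst hac
        have hp : List.isPrefixOf [a] (a :: t) = true := by simp [List.isPrefixOf]
        rw [if_pos hp]
        rw [show List.drop [a].length (a :: t) = t from rfl,
            show ([] : List Char).reverse ++ acc = acc from rfl]
        rw [ih t acc (by simpa using h)]
        simp
      · have hp : List.isPrefixOf [c] (a :: t) = false := by
          simp [List.isPrefixOf, Ne.symm hac]
        rw [if_neg (by simp [hp])]
        rw [ih t (a :: acc) (by simpa using h)]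
        simp [hac]

theorem replace_single (cs : List Char) (c : Char) :
    PySem.Chars.replace cs [c] [] = cs.filter (fun x => !(x == c)) := by
  rw [PySem.Chars.replace]
  simp only [List.isEmpty_cons, Bool.false_eq_true, if_false]
  simpa using replace_go_single c cs.length cs [] le_rfl

-- one step of A's loop is a filter, whether or not the `in` branch fires
theorem step_eq_filter (s ch : String) (c : Char) (hch : ch.toList = [c]) :
    (if PySem.Str.isIn ch s then PySem.Str.replace s ch "" else s)
      = String.ofList (s.toList.filter (fun x => !(x == c))) := by
  by_cases h : PySem.Str.isIn ch s = true
  · rw [if_pos h]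
    show String.ofList (PySem.Chars.replace s.toList ch.toList "".toList) = _
    rw [hch, show ("" : String).toList = [] from rfl, replace_single]
  · rw [if_neg (by simpa using h)]
    have hmem : c ∉ s.toList := by
      intro hc
      apply h
      rw [show PySem.Str.isIn ch s = PySem.Chars.isIn ch.toList s.toList from rfl, hch]
      rw [PySem.Chars.isIn_iff_infix]
      obtain ⟨l1, l2, he⟩ := List.append_of_mem hc
      rw [he]
      exact ⟨l1, l2, by simp⟩
    rw [List.filter_eq_self.2 (by intro a ha; simp; rintro rfl; exact hmem ha)]
    simp

-- ===== VERDICT (by name: the statement is the Claim_ definition above) =====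
theorem safe_hostname_py_spec : Claim_equal_safe_hostname_py := by
  intro hostname _
  unfold Spec_safe_hostname_py safe_hostname_py safe_hostname_py_alt
  simp only [List.foldl]
  rw [step_eq_filter _ "," ',' rfl,
      step_eq_filter _ "\"" '"' rfl,
      step_eq_filter _ "\\" '\\' rfl,
      step_eq_filter _ "<" '<' rfl,
      step_eq_filter _ ">" '>' rfl]
  simp only [String.toList_ofList, List.filter_filter]
  have hpred : ∀ x : Char,
      (!(x == '>') && (!(x == '<') && (!(x == '\\') && (!(x == '"') && !(x == ',')))))
        = (!([',', '"', '\\', '<', '>'].contains x)) := by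
    intro x
    simp only [List.contains_cons, List.contains_nil, Bool.or_false, Bool.not_or]
    cases h1 : x == ',' <;> cases h2 : x == '"' <;> cases h3 : x == '\\' <;>
      cases h4 : x == '<' <;> cases h5 : x == '>' <;> rfl
  set f := hostname.toList.filter (fun c => !([',', '"', '\\', '<', '>'].contains c)) with hf
  have hfe : (hostname.toList.filter
      (fun a => !(a == '>') && (!(a == '<') && (!(a == '\\') && (!(a == '"') && !(a == ',')))))) = f := by
    rw [hf]; exact List.filter_congr (fun x _ => hpred x)
  rw [hfe]
  show PySem.Str.slice (String.ofList f) none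
      (some (if PySem.Str.len (String.ofList f) > 15 then 15 else PySem.Str.len (String.ofList f)))
    = String.ofList (f.take 15)
  have hlen : PySem.Str.len (String.ofList f) = (f.length : Int) := by
    simp [PySem.Str.len]
  rw [hlen]
  show String.ofList (PySem.Chars.slice (String.ofList f).toList none _) = _
  rw [String.toList_ofList, PySem.Chars.slice_eq_listSlice]
  by_cases hl : (f.length : Int) > 15
  · rw [if_pos hl, PySem.List.slice_to f (b := 15) (by norm_num)]
    rfl
  · rw [if_neg hl, PySem.List.slice_to f (b := (f.length : Int)) (by positivity)]
    have h15 : f.length ≤ 15 := by exact_mod_cast not_lt.1 hl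
    rw [Int.toNat_natCast, List.take_of_length_le le_rfl, List.take_of_length_le h15]
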